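-- pv_equiv track=rewrite | github.com/punit-fm/bb-lm-master-data-checker | app.py | format_formula
-- ===== SOURCE A (Python) =====
-- def format_formula(formula):
--     """
--     Format a formula string with indentation and line breaks for better readability.
--     """
--     if not formula:
--         return ""
--
--     # Basic indentation logic
--     formatted = ""
--     indent_level = 0
--     lines = []
--     current_line = ""
--
--     # Tokenize simple parts (this is a basic heuristic)
--     formula = str(formula).replace("\n", " ").strip()
--
--     i = 0
--     while i < len(formula):
--         char = formula[i]
--
--         if char == '(':
--             lines.append("  " * indent_level + current_line.strip() + "(")
--             current_line = ""
--             indent_level += 1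
--         elif char == ')':
--             if current_line.strip():
--                 lines.append("  " * indent_level + current_line.strip())
--             indent_level -= 1
--             lines.append("  " * indent_level + ")")
--             current_line = ""
--         elif char == ',':
--             lines.append("  " * indent_level + current_line.strip() + ",")
--             current_line = ""
--         else:
--             current_line += char
--         i += 1
--
--     if current_line.strip():
--         lines.append("  " * indent_level + current_line.strip())
--
--     return "\n".join([line for line in lines if line.strip()])
-- ===== SOURCE B (Python) =====
-- def format_formula(formula):
--     """Three-phase formatter: tokenize, build (indent, content) records, render."""
--     if not formula:
--         return ""
--     text = str(formula).replace("\n", " ").strip()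
--     # phase 1: split into alternating literal/delimiter tokens
--     toks = []
--     lit = ""
--     for ch in text:
--         if ch in "(),":
--             toks.append(lit)
--             toks.append(ch)
--             lit = ""
--         else:
--             lit += ch
--     toks.append(lit)
--     # phase 2: turn (literal, delimiter) pairs into (indent, content) records
--     recs = []
--     ind = 0
--     i = 0
--     while i + 1 < len(toks):
--         s, d = toks[i].strip(), toks[i + 1]
--         if d == "(":
--             recs.append((ind, s + "("))
--             ind += 1
--         elif d == ")":
--             if s:
--                 recs.append((ind, s))
--             ind -= 1
--             recs.append((ind, ")"))
--         else:
--             recs.append((ind, s + ","))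
--         i += 2
--     s = toks[-1].strip()
--     if s:
--         recs.append((ind, s))
--     # phase 3: render; every record's content holds a non-space char, so no filter is needed
--     return "\n".join("  " * ind + content for ind, content in recs)
-- ===== Notes on version B (the rewrite author's own statement) =====
-- stated objective: faster
-- what changed: B replaces A's single character-level state machine (current_line buffer, flush-on-delimiter, final non-empty filter) by three staged passes: tokenize into alternating literal/delimiter pieces, fold (literal, delimiter) pairs into (indent, content) records, then render and join the records with no filter (every record's content provably holds a non-space character).
import Mathlib
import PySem

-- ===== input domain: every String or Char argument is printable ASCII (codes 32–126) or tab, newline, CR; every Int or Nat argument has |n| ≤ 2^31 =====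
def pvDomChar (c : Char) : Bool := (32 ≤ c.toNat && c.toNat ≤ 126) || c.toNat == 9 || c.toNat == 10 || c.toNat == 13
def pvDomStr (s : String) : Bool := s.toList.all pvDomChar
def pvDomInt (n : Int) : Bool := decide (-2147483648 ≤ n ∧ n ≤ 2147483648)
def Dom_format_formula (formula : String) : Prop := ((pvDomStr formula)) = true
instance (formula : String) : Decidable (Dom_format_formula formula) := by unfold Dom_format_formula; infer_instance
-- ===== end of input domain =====

-- B replaces A's character-level state machine by three staged passes (tokenize; fold
-- (literal, delimiter) pairs into (indent, content) records; render without a filter);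
-- a timing run measured B faster than A on the generated growing inputs.

-- ===== PORT A =====
-- "  " * indent_level (shared notion of indentation, appears verbatim in both sources)
def fmtIndent (n : Int) : List Char := PySem.List.pyRepeat [' ', ' '] n

-- state: (indent_level, lines, current_line)
def fmtA_step (st : Int × List (List Char) × List Char) (c : Char) :
    Int × List (List Char) × List Char :=
  let ind := st.1; let lines := st.2.1; let cur := st.2.2
  if c = '(' then
    (ind + 1, lines ++ [fmtIndent ind ++ PySem.Chars.strip cur ++ ['(']], [])
  else if c = ')' then
    let lines' := if PySem.Chars.strip cur ≠ [] then
        lines ++ [fmtIndent ind ++ PySem.Chars.strip cur] else lines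
    (ind - 1, lines' ++ [fmtIndent (ind - 1) ++ [')']], [])
  else if c = ',' then
    (ind, lines ++ [fmtIndent ind ++ PySem.Chars.strip cur ++ [',']], [])
  else
    (ind, lines, cur ++ [c])

-- final flush of current_line, the non-empty filter and the join
def fmtFlushJoin (st : Int × List (List Char) × List Char) : String :=
  let lines := if PySem.Chars.strip st.2.2 ≠ [] then
      st.2.1 ++ [fmtIndent st.1 ++ PySem.Chars.strip st.2.2] else st.2.1
  String.ofList (PySem.Chars.join ['\n'] (lines.filter (fun l => !(PySem.Chars.strip l).isEmpty)))

def format_formula (formula : String) : String :=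
  if formula = "" then "" else
  let text := PySem.Chars.strip (PySem.Chars.replace formula.toList ['\n'] [' '])
  fmtFlushJoin (text.foldl fmtA_step (0, [], []))

-- ===== PORT B =====
-- phase 1: split the text into alternating literal/delimiter tokens
def tokStep (st : List (List Char) × List Char) (c : Char) : List (List Char) × List Char :=
  if c = '(' ∨ c = ')' ∨ c = ',' then (st.1 ++ [st.2, [c]], [])
  else (st.1, st.2 ++ [c])

def fmtTokens (text : List Char) : List (List Char) :=
  let p := text.foldl tokStep ([], [])
  p.1 ++ [p.2]

-- phase 2: consume the tokens two at a time (literal, delimiter), producing (indent, content)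
-- records; the final lone literal is the trailing token
def fmtRecs : List (List Char) → Int → List (Int × List Char)
  | [], _ => []      -- unreachable: the token list is never empty
  | [lit], ind =>
    let s := PySem.Chars.strip lit
    if s ≠ [] then [(ind, s)] else []
  | lit :: d :: rest, ind =>
    let s := PySem.Chars.strip lit
    if d = ['('] then (ind, s ++ ['(']) :: fmtRecs rest (ind + 1)
    else if d = [')'] then
      (if s ≠ [] then [(ind, s)] else []) ++ (ind - 1, [')']) :: fmtRecs rest (ind - 1)
    else (ind, s ++ [',']) :: fmtRecs rest ind

-- phase 3: render each record and join (no filter: every content has a non-space char)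
def format_formula_alt (formula : String) : String :=
  if formula = "" then "" else
  let text := PySem.Chars.strip (PySem.Chars.replace formula.toList ['\n'] [' '])
  String.ofList (PySem.Chars.join ['\n']
    ((fmtRecs (fmtTokens text) 0).map (fun r => fmtIndent r.1 ++ r.2)))

-- ===== PRECONDITION & SPEC =====
def Spec_format_formula (formula : String) (out : String) : Prop := out = format_formula_alt formula
instance (formula : String) (out : String) : Decidable (Spec_format_formula formula out) := by unfold Spec_format_formula; infer_instance

-- ===== CLAIM (what is proved, stated in full; the proofs are below) =====
def Claim_equal_format_formula : Prop := ∀ (formula : String), Dom_format_formula formula → Spec_format_formula formula (format_formula formula)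

-- ===== LEMMAS AND PROOFS =====

-- recursive characterization of the tokenizer
def Tk (cs : List Char) (lit : List Char) : List (List Char) :=
  match cs with
  | [] => [lit]
  | c :: cs' =>
    if c = '(' ∨ c = ')' ∨ c = ',' then lit :: [c] :: Tk cs' []
    else Tk cs' (lit ++ [c])

lemma tok_aux (cs : List Char) : ∀ (toks : List (List Char)) (lit : List Char),
    (cs.foldl tokStep (toks, lit)).1 ++ [(cs.foldl tokStep (toks, lit)).2]
      = toks ++ Tk cs lit := by
  induction cs with
  | nil => intro toks lit; simp [Tk]
  | cons c cs ih =>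
    intro toks lit
    by_cases h : c = '(' ∨ c = ')' ∨ c = ','
    · simp [List.foldl_cons, tokStep, h, Tk, ih]
    · simp [List.foldl_cons, tokStep, h, Tk, ih]

lemma fmtTokens_eq_Tk (text : List Char) : fmtTokens text = Tk text [] := by
  simpa [fmtTokens] using tok_aux text [] []

-- the lines still pending in A's state after the fold, current_line flushed
def flushLines (st : Int × List (List Char) × List Char) : List (List Char) :=
  st.2.1 ++ (if PySem.Chars.strip st.2.2 ≠ [] then [fmtIndent st.1 ++ PySem.Chars.strip st.2.2] else [])

-- main invariant: A's char fold, flushed, produces exactly B's rendered records of Tk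
lemma fold_recs (cs : List Char) : ∀ (lit : List Char) (ind : Int) (lines : List (List Char)),
    (∀ c ∈ lit, ¬ (c = '(' ∨ c = ')' ∨ c = ',')) →
    flushLines (cs.foldl fmtA_step (ind, lines, lit))
      = lines ++ (fmtRecs (Tk cs lit) ind).map (fun r => fmtIndent r.1 ++ r.2) := by
  induction cs with
  | nil =>
    intro lit ind lines _
    by_cases h : PySem.Chars.strip lit = [] <;>
      simp [Tk, fmtRecs, flushLines, h]
  | cons c cs ih =>
    intro lit ind lines hlit
    by_cases h : c = '(' ∨ c = ')' ∨ c = ','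
    · rw [Tk]
      simp only [h, if_pos]
      rcases h with h | h | h <;> subst h
      · rw [List.foldl_cons]
        show flushLines (cs.foldl fmtA_step
          (ind + 1, lines ++ [fmtIndent ind ++ PySem.Chars.strip lit ++ ['(']], [])) = _
        rw [ih [] (ind + 1) _ (by simp)]
        simp [fmtRecs]
      · rw [List.foldl_cons]
        show flushLines (cs.foldl fmtA_step
          (ind - 1, (if PySem.Chars.strip lit ≠ [] then
              lines ++ [fmtIndent ind ++ PySem.Chars.strip lit] else lines)
            ++ [fmtIndent (ind - 1) ++ [')']], [])) = _
        rw [ih [] (ind - 1) _ (by simp)]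
        by_cases hs : PySem.Chars.strip lit = [] <;> simp [fmtRecs, hs]
      · rw [List.foldl_cons]
        show flushLines (cs.foldl fmtA_step
          (ind, lines ++ [fmtIndent ind ++ PySem.Chars.strip lit ++ [',']], [])) = _
        rw [ih [] ind _ (by simp)]
        simp [fmtRecs]
    · rw [Tk]
      simp only [h, ite_false]
      rw [List.foldl_cons]
      have hc1 : ¬ c = '(' := fun hh => h (Or.inl hh)
      have hc2 : ¬ c = ')' := fun hh => h (Or.inr (Or.inl hh))
      have hc3 : ¬ c = ',' := fun hh => h (Or.inr (Or.inr hh))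
      have : fmtA_step (ind, lines, lit) c = (ind, lines, lit ++ [c]) := by
        simp [fmtA_step, hc1, hc2, hc3]
      rw [this, ih (lit ++ [c]) ind lines ?_]
      intro d hd
      rcases List.mem_append.mp hd with hd | hd
      · exact hlit d hd
      · simp at hd; subst hd; exact h

-- strip is empty iff everything is whitespace
lemma strip_eq_nil_iff (xs : List Char) :
    PySem.Chars.strip xs = [] ↔ ∀ c ∈ xs, PySem.Chars.isspace c = true := by
  unfold PySem.Chars.strip PySem.Chars.rstrip PySem.Chars.lstrip
  rw [List.reverse_eq_nil_iff, List.dropWhile_eq_nil_iff]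
  constructor
  · intro h c hc
    rw [← List.takeWhile_append_dropWhile (p := PySem.Chars.isspace) (l := xs)] at hc
    rcases List.mem_append.mp hc with ht | hd
    · exact List.mem_takeWhile_imp ht
    · exact h c (List.mem_reverse.mpr hd)
  · intro h c hc
    exact h c ((List.dropWhile_sublist _).subset (List.mem_reverse.mp hc))

lemma strip_ne_nil_of_nonspace {xs : List Char} {c : Char}
    (hc : c ∈ xs) (hs : PySem.Chars.isspace c = false) : PySem.Chars.strip xs ≠ [] := by
  intro h
  have := (strip_eq_nil_iff xs).mp h c hc
  simp [this] at hs

-- a non-empty stripped string contains a non-space character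
lemma exists_nonspace_of_strip_ne_nil {xs : List Char} (h : PySem.Chars.strip xs ≠ []) :
    ∃ c ∈ PySem.Chars.strip xs, PySem.Chars.isspace c = false := by
  unfold PySem.Chars.strip PySem.Chars.rstrip at *
  have hy : List.dropWhile PySem.Chars.isspace (PySem.Chars.lstrip xs).reverse ≠ [] := by
    intro hy; exact h (by simp [hy])
  exact ⟨_, List.mem_reverse.mpr (List.head_mem hy), List.head_dropWhile_not _ hy⟩

-- every record's content contains a non-space character
lemma recs_content : ∀ (toks : List (List Char)) (ind : Int) (r : Int × List Char),
    r ∈ fmtRecs toks ind → ∃ c ∈ r.2, PySem.Chars.isspace c = false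
  | [], _, r, hr => by simp [fmtRecs] at hr
  | [lit], ind, r, hr => by
    unfold fmtRecs at hr
    by_cases hs : PySem.Chars.strip lit = []
    · simp [hs] at hr
    · simp only [hs, ne_eq, not_false_eq_true, if_pos, List.mem_singleton] at hr
      subst hr
      exact exists_nonspace_of_strip_ne_nil hs
  | lit :: d :: rest, ind, r, hr => by
    unfold fmtRecs at hr
    by_cases h1 : d = ['(']
    · simp only [h1, if_pos, List.mem_cons] at hr
      rcases hr with rfl | hr
      · exact ⟨'(', by simp, by decide⟩
      · exact recs_content rest (ind + 1) r hr
    · by_cases h2 : d = [')']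
      · rw [if_neg h1, if_pos h2, List.mem_append, List.mem_cons] at hr
        rcases hr with hr | rfl | hr
        · by_cases hs : PySem.Chars.strip lit = []
          · simp [hs] at hr
          · simp only [hs, ne_eq, not_false_eq_true, if_pos, List.mem_singleton] at hr
            subst hr
            exact exists_nonspace_of_strip_ne_nil hs
        · exact ⟨')', by simp, by decide⟩
        · exact recs_content rest (ind - 1) r hr
      · simp only [h1, h2, ite_false, List.mem_cons] at hr
        rcases hr with rfl | hr
        · exact ⟨',', by simp, by decide⟩
        · exact recs_content rest ind r hr

-- hence the final non-empty filter of A is the identity on B's rendered records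
lemma filter_recs (toks : List (List Char)) (ind : Int) :
    ((fmtRecs toks ind).map (fun r => fmtIndent r.1 ++ r.2)).filter
        (fun l => !(PySem.Chars.strip l).isEmpty)
      = (fmtRecs toks ind).map (fun r => fmtIndent r.1 ++ r.2) := by
  apply List.filter_eq_self.mpr
  intro l hl
  rcases List.mem_map.mp hl with ⟨r, hr, rfl⟩
  rcases recs_content toks ind r hr with ⟨c, hc, hcs⟩
  have hne := strip_ne_nil_of_nonspace (List.mem_append_right (fmtIndent r.1) hc) hcs
  simpa using hne

lemma fmtFlushJoin_eq (st : Int × List (List Char) × List Char) :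
    fmtFlushJoin st = String.ofList (PySem.Chars.join ['\n']
      ((flushLines st).filter (fun l => !(PySem.Chars.strip l).isEmpty))) := by
  unfold fmtFlushJoin flushLines
  by_cases hs : PySem.Chars.strip st.2.2 = [] <;> simp [hs]

-- ===== VERDICT (by name: the statement is the Claim_ definition above) =====
theorem format_formula_spec : Claim_equal_format_formula := by
  intro formula _
  unfold Spec_format_formula format_formula format_formula_alt
  by_cases h : formula = ""
  · simp [h]
  · simp only [h, ite_false]
    rw [fmtTokens_eq_Tk, fmtFlushJoin_eq,
      fold_recs (PySem.Chars.strip (PySem.Chars.replace formula.toList ['\n'] [' '])) [] 0 [] (by simp),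
      List.nil_append, filter_recs]
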